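-- pv_equiv track=rewrite | github.com/NeshMx/meraki | main.py | min_algorithm
-- ===== SOURCE A (Python) =====
-- def min_algorithm(numbers):
--     min_num = None
--     min_counter = 0
--     for key, value in numbers.items():
--         if min_num == None:
--             min_num = key
--             min_counter = value
--         elif value > min_counter:
--             min_num = key
--             min_counter = value
--         elif value == min_counter and key < min_num:
--             min_num = key
--             min_counter = value
--     return min_num
-- ===== SOURCE B (Python) =====
-- def min_algorithm(numbers):
--     if not numbers:
--         return None
--     return sorted(numbers.items(), key=lambda kv: (-kv[1], kv[0]))[0][0]
-- ===== Notes on version B (the rewrite author's own statement) =====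
-- stated objective: alternative
-- what changed: Replaces the hand-written running-best accumulator loop with a stable sort of the items by the compound key (-value, key) followed by taking the first element's key.
-- outside the precondition, e.g. on min_algorithm({}): A returns None, B returns None
import Mathlib
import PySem

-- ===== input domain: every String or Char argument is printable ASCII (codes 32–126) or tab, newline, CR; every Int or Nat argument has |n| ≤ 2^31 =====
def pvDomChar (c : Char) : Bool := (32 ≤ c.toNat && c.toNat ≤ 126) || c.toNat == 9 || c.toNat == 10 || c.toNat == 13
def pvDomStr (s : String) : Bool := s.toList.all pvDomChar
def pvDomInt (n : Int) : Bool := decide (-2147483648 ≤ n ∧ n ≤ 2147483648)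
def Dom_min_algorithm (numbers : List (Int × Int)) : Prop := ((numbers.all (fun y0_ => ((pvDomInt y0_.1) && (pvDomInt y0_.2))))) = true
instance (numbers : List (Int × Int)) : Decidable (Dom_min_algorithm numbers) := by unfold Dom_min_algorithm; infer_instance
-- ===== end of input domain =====

-- B replaces A's running-best accumulator loop by a stable sort of the items on the
-- compound key (-value, key) followed by taking the first element's key (alternative
-- decomposition, not claimed faster). Pre_ excludes the empty dict, on which the Python
-- A returns None (not an Int).


-- ===== PORT A =====
-- one step of A's for-loop: state = (min_num : Option Int, min_counter : Int)
def minAlgStep (s : Option Int × Int) (kv : Int × Int) : Option Int × Int :=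
  match s.1 with
  | none => (some kv.1, kv.2)                       -- if min_num == None
  | some m =>
    if kv.2 > s.2 then (some kv.1, kv.2)            -- elif value > min_counter
    else if kv.2 = s.2 ∧ kv.1 < m then (some kv.1, kv.2)  -- elif value == min_counter and key < min_num
    else s

def min_algorithm (numbers : List (Int × Int)) : Int :=
  -- the final min_num is none exactly on the empty input, which Pre_ excludes (Python returns None there)
  ((numbers.foldl minAlgStep (none, 0)).1).getD 0

-- ===== PORT B =====
def min_algorithm_alt (numbers : List (Int × Int)) : Int :=
  -- sorted(numbers.items(), key=lambda kv: (-kv[1], kv[0]))[0][0]; empty input excluded by Pre_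
  match PySem.List.sorted2 numbers (fun kv => -kv.2) (fun kv => kv.1) with
  | [] => 0
  | kv :: _ => kv.1

-- ===== PRECONDITION & SPEC =====
-- Pre_ excludes the empty dict: there A returns None, which is not an Int.
def Pre_min_algorithm (numbers : List (Int × Int)) : Prop := numbers ≠ []
instance (numbers : List (Int × Int)) : Decidable (Pre_min_algorithm numbers) := by unfold Pre_min_algorithm; infer_instance
def pvWitness_min_algorithm : (List (Int × Int)) := [(3, 5), (1, 5), (2, 7)]

def Spec_min_algorithm (numbers : List (Int × Int)) (out : Int) : Prop := out = min_algorithm_alt numbers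
instance (numbers : List (Int × Int)) (out : Int) : Decidable (Spec_min_algorithm numbers out) := by unfold Spec_min_algorithm; infer_instance

-- ===== CLAIM (what is proved, stated in full; the proofs are below) =====
def Claim_equal_min_algorithm : Prop := ∀ (numbers : List (Int × Int)), Dom_min_algorithm numbers → Pre_min_algorithm numbers → Spec_min_algorithm numbers (min_algorithm numbers)

-- ===== LEMMAS AND PROOFS =====

-- the comparison sorted2 uses, specialised to B's key (-value, key)
def bestLt (x h : Int × Int) : Bool :=
  decide (-x.2 < -h.2) || (!decide (-h.2 < -x.2) && decide (x.1 < h.1))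

-- "running first-minimum" step on an optional best pair
def bestStep (b : Option (Int × Int)) (x : Int × Int) : Option (Int × Int) :=
  match b with
  | none => some x
  | some h => if bestLt x h then some x else some h

def stOf (b : Option (Int × Int)) : Option Int × Int :=
  match b with
  | none => (none, 0)
  | some (m, c) => (some m, c)

-- A's update condition is exactly the bestLt comparison
theorem minAlgStep_eq_bestStep (x : Int × Int) (b : Option (Int × Int)) :
    minAlgStep (stOf b) x = stOf (bestStep b x) := by
  cases b with
  | none => rfl
  | some h =>
    obtain ⟨m, c⟩ := h
    have hb : (bestLt x (m, c) = true) ↔ (x.2 > c ∨ (x.2 = c ∧ x.1 < m)) := by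
      simp [bestLt]; omega
    by_cases hcond : x.2 > c ∨ (x.2 = c ∧ x.1 < m)
    · have hT : bestStep (some (m, c)) x = some x := by
        simp [bestStep, hb.mpr hcond]
      rw [hT]
      simp only [minAlgStep, stOf]
      split_ifs with h1 h2
      · rfl
      · rfl
      · exfalso; rcases hcond with h | h
        · exact h1 h
        · exact h2 h
    · have hF : bestStep (some (m, c)) x = some (m, c) := by
        have : bestLt x (m, c) = false := by
          cases hB : bestLt x (m, c)
          · rfl
          · exact absurd (hb.mp hB) hcond
        simp [bestStep, this]
      rw [hF]
      simp only [minAlgStep, stOf]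
      split_ifs with h1 h2
      · exact absurd (Or.inl h1) hcond
      · exact absurd (Or.inr h2) hcond
      · rfl

-- A's loop is the running-first-minimum fold under bestLt
theorem foldl_minAlgStep_eq (xs : List (Int × Int)) :
    ∀ b : Option (Int × Int), xs.foldl minAlgStep (stOf b) = stOf (xs.foldl bestStep b) := by
  induction xs with
  | nil => intro b; rfl
  | cons x t ih =>
    intro b
    simpa [List.foldl_cons, minAlgStep_eq_bestStep x b] using ih (bestStep b x)

-- head? of the insertion-sort fold is the running-first-minimum fold
theorem head?_foldl_insertBy (lt : Int × Int → Int × Int → Bool) (xs : List (Int × Int)) :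
    ∀ acc : List (Int × Int),
      (xs.foldl (fun a x => PySem.List.insertBy lt x a) acc).head? =
        xs.foldl (fun b x =>
          match b with
          | none => some x
          | some h => if lt x h then some x else some h) acc.head? := by
  induction xs with
  | nil => intro acc; rfl
  | cons x t ih =>
    intro acc
    have hins : (PySem.List.insertBy lt x acc).head? =
        (match acc.head? with
          | none => some x
          | some h => if lt x h then some x else some h) := by
      cases acc with
      | nil => rfl
      | cons y ys =>
        by_cases hxy : lt x y = true
        · simp [PySem.List.insertBy, hxy]
        · rw [Bool.not_eq_true] at hxy
          simp [PySem.List.insertBy, hxy]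
    rw [List.foldl_cons, ih, List.foldl_cons, hins]

-- ===== VERDICT (by name: the statement is the Claim_ definition above) =====
theorem min_algorithm_spec : Claim_equal_min_algorithm := by
  intro numbers _ _
  unfold Spec_min_algorithm min_algorithm min_algorithm_alt
  have hA : numbers.foldl minAlgStep ((none : Option Int), (0 : Int)) =
      stOf (numbers.foldl bestStep none) := foldl_minAlgStep_eq numbers none
  have hB : (PySem.List.sorted2 numbers (fun kv => -kv.2) (fun kv => kv.1)).head? =
      numbers.foldl bestStep none := by
    rw [show PySem.List.sorted2 numbers (fun kv => -kv.2) (fun kv => kv.1) =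
        numbers.foldl (fun a x => PySem.List.insertBy bestLt x a) [] from rfl]
    rw [head?_foldl_insertBy]
    rfl
  rw [hA]
  cases hs : PySem.List.sorted2 numbers (fun kv => -kv.2) (fun kv => kv.1) with
  | nil =>
    rw [hs] at hB
    simp only [List.head?_nil] at hB
    rw [← hB]
    rfl
  | cons kv t =>
    obtain ⟨m, c⟩ := kv
    rw [hs] at hB
    simp only [List.head?_cons] at hB
    rw [← hB]
    rfl
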